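-- pv_equiv track=rewrite | github.com/JakeSaunders1995/comp16321MarkingMid | unpacked_repos/m01964ua_prog1_rugby/rugby_m01964ua.py | teamTotal
-- ===== SOURCE A (Python) =====
-- def teamTotal(whichteam):
-- 	total = 0
-- 	for h in whichteam:
-- 		if h == 't':
-- 			total = total + 5
-- 		elif h == 'c':
-- 			total = total + 2
-- 		elif h == 'p':
-- 			total = total + 3
-- 		elif h == 'd':
-- 			total = total + 3
--
-- 	return total
-- ===== SOURCE B (Python) =====
-- def teamTotal(whichteam):
--     # Four staged count passes, one per scoring code, instead of a
--     # per-element branch-and-accumulate loop.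
--     return (5 * whichteam.count('t')
--             + 2 * whichteam.count('c')
--             + 3 * (whichteam.count('p') + whichteam.count('d')))
-- ===== Notes on version B (the rewrite author's own statement) =====
-- stated objective: idiomatic
-- what changed: A makes one pass with per-element branching and a running accumulator; B has no loop or branching of its own: it makes four staged list.count scans (one per scoring code) and returns the fixed weighted combination of those counts.
import Mathlib
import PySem

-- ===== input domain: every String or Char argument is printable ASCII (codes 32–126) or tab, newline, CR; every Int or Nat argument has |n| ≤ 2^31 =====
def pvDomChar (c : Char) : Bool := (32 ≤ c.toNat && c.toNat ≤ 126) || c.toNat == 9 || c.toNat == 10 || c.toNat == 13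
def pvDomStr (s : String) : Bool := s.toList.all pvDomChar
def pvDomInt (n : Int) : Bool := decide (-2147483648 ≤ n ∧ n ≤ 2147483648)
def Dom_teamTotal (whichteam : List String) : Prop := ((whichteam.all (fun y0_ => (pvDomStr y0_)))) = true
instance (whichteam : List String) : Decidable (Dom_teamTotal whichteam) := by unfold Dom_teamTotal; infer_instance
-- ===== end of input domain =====

-- B replaces A's single branch-and-accumulate loop with four staged per-code
-- count scans combined by fixed arithmetic (objective: idiomatic).

-- ===== PORT A =====
-- per-element branching accumulator, as in A
def teamTotal (whichteam : List String) : Int :=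
  whichteam.foldl (fun total h =>
    if h == "t" then total + 5
    else if h == "c" then total + 2
    else if h == "p" then total + 3
    else if h == "d" then total + 3
    else total) 0

-- ===== PORT B =====
-- four list.count scans, one per scoring code, combined arithmetically
def teamTotal_alt (whichteam : List String) : Int :=
  5 * (PySem.List.count whichteam "t" : Int)
    + 2 * (PySem.List.count whichteam "c" : Int)
    + 3 * ((PySem.List.count whichteam "p" : Int) + (PySem.List.count whichteam "d" : Int))

-- ===== PRECONDITION & SPEC =====
def Spec_teamTotal (whichteam : List String) (out : Int) : Prop := out = teamTotal_alt whichteam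
instance (whichteam : List String) (out : Int) : Decidable (Spec_teamTotal whichteam out) := by unfold Spec_teamTotal; infer_instance

-- ===== CLAIM (what is proved, stated in full; the proofs are below) =====
def Claim_equal_teamTotal : Prop := ∀ (whichteam : List String), Dom_teamTotal whichteam → Spec_teamTotal whichteam (teamTotal whichteam)

-- ===== LEMMAS AND PROOFS =====

theorem teamTotal_count (whichteam : List String) (t : Int) :
    whichteam.foldl (fun total h =>
      if h == "t" then total + 5
      else if h == "c" then total + 2
      else if h == "p" then total + 3
      else if h == "d" then total + 3
      else total) t
      = t + 5 * (whichteam.count "t" : Int) + 2 * (whichteam.count "c" : Int)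
          + 3 * (whichteam.count "p" : Int) + 3 * (whichteam.count "d" : Int) := by
  induction whichteam generalizing t with
  | nil => simp
  | cons x xs ih =>
    simp only [List.foldl_cons, List.count_cons]
    rw [ih]
    by_cases h1 : x = "t"
    · subst h1; simp; ring
    · by_cases h2 : x = "c"
      · subst h2; simp [h1]; ring
      · by_cases h3 : x = "p"
        · subst h3; simp [h1, h2]; ring
        · by_cases h4 : x = "d"
          · subst h4; simp [h1, h2, h3]; ring
          · simp [h1, h2, h3, h4]

-- ===== VERDICT (by name: the statement is the Claim_ definition above) =====
theorem teamTotal_spec : Claim_equal_teamTotal := by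
  intro whichteam _
  unfold Spec_teamTotal teamTotal teamTotal_alt
  rw [teamTotal_count whichteam 0]
  simp [PySem.List.count]
  ring
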